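-- pv_equiv track=rewrite | github.com/JasonEricZhan/Project-of-data-mining-CS235-UCR | Yi-Zhen Tsai/main.py | lyricist_count
-- ===== SOURCE A (Python) =====
-- def lyricist_count(lyricist):
--     if lyricist == 'no_lyricist' or lyricist == 'no_composer' or lyricist == 'no_artist':
--         return 0
--     else:
--         str_count=1
--         str_list = ['|', '/', '\\', ';', ',', '&']
--         for str in str_list:
--             str_count = str_count + lyricist.count(str)
--         return str_count
-- ===== SOURCE B (Python) =====
-- def lyricist_count(lyricist):
--     if lyricist in ('no_lyricist', 'no_composer', 'no_artist'):
--         return 0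
--     seps = {'|', '/', '\\', ';', ',', '&'}
--     hits = 0
--     for ch in lyricist:
--         if ch in seps:
--             hits += 1
--     return 1 + hits
-- ===== Notes on version B (the rewrite author's own statement) =====
-- stated objective: alternative
-- what changed: Instead of six full scans of the string (one str.count call per separator), B makes a single pass over the characters of lyricist, counting those that belong to the separator set; it trades six C-implemented scans for one interpreted pass.
import Mathlib
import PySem

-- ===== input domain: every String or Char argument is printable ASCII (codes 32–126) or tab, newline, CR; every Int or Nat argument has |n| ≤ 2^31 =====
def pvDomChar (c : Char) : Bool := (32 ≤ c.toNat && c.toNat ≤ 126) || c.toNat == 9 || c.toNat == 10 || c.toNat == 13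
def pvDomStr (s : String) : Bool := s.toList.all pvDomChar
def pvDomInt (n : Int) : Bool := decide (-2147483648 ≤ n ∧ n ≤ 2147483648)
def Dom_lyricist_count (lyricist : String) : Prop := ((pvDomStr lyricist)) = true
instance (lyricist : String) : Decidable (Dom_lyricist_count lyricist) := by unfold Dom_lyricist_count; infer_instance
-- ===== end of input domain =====

-- B replaces A's six per-separator str.count scans by one single pass over the characters,
-- counting those in the separator set (objective: alternative single-pass traversal).

-- ===== PORT A =====
-- literal transliteration of A: guard, then fold over the six separator strings adding .count
def lyricist_count (lyricist : String) : Int :=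
  if lyricist = "no_lyricist" ∨ lyricist = "no_composer" ∨ lyricist = "no_artist" then 0
  else
    (["|", "/", "\\", ";", ",", "&"] : List String).foldl
      (fun str_count str => str_count + (PySem.Str.count lyricist str : Int)) 1

-- ===== PORT B =====
-- literal transliteration of B: guard (tuple membership), then one pass over the characters
def lyricist_count_alt (lyricist : String) : Int :=
  if (["no_lyricist", "no_composer", "no_artist"] : List String).contains lyricist then 0
  else
    1 + lyricist.toList.foldl
      (fun hits ch => if (PySem.Set.ofList ['|', '/', '\\', ';', ',', '&']).contains ch then hits + 1 else hits) 0

-- ===== PRECONDITION & SPEC =====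
def Spec_lyricist_count (lyricist : String) (out : Int) : Prop := out = lyricist_count_alt lyricist
instance (lyricist : String) (out : Int) : Decidable (Spec_lyricist_count lyricist out) := by unfold Spec_lyricist_count; infer_instance

-- ===== CLAIM (what is proved, stated in full; the proofs are below) =====
def Claim_equal_lyricist_count : Prop := ∀ (lyricist : String), Dom_lyricist_count lyricist → Spec_lyricist_count lyricist (lyricist_count lyricist)

-- ===== LEMMAS AND PROOFS =====

-- Chars.count.go with a single-character needle is List.count
theorem pv_count_go_single (c : Char) : ∀ (cs : List Char) (fuel acc : Nat), cs.length ≤ fuel →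
    PySem.Chars.count.go [c] fuel cs acc = acc + cs.count c := by
  intro cs
  induction cs with
  | nil => intro fuel acc _; cases fuel <;> simp [PySem.Chars.count.go]
  | cons x t ih =>
    intro fuel acc hle
    cases fuel with
    | zero => simp at hle
    | succ f =>
      simp only [List.length_cons, Nat.succ_le_succ_iff] at hle
      by_cases h : c = x
      · subst h
        simp [PySem.Chars.count.go, List.isPrefixOf, ih f (acc + 1) hle]
        omega
      · have hb : (c == x) = false := by simp [h]
        simp [PySem.Chars.count.go, List.isPrefixOf, hb, ih f acc hle, Ne.symm h]

-- s.count(c) for a one-character c is the number of occurrences of the character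
theorem pv_count_single (cs : List Char) (c : Char) :
    PySem.Chars.count cs [c] = cs.count c := by
  simp [PySem.Chars.count, pv_count_go_single c cs cs.length 0 le_rfl]

-- sum of the six per-separator counts = one countP over the separator set
theorem pv_sum_counts (cs : List Char) :
    cs.count '|' + cs.count '/' + cs.count '\\' + cs.count ';' + cs.count ',' + cs.count '&'
      = cs.countP (fun ch => (['|', '/', '\\', ';', ',', '&'] : List Char).contains ch) := by
  induction cs with
  | nil => decide
  | cons x t ih =>
    have hx : ((if (x == ('|':Char)) then 1 else 0) + (if (x == ('/':Char)) then 1 else 0)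
        + (if (x == ('\\':Char)) then 1 else 0) + (if (x == (';':Char)) then 1 else 0)
        + (if (x == (',':Char)) then 1 else 0) + (if (x == ('&':Char)) then 1 else 0) : Nat)
        = if (['|', '/', '\\', ';', ',', '&'] : List Char).contains x then 1 else 0 := by
      by_cases h : x ∈ (['|', '/', '\\', ';', ',', '&'] : List Char)
      · rcases (by simpa using h : x = '|' ∨ x = '/' ∨ x = '\\' ∨ x = ';' ∨ x = ',' ∨ x = '&') with
          rfl|rfl|rfl|rfl|rfl|rfl <;> decide
      · simp at h
        obtain ⟨h1, h2, h3, h4, h5, h6⟩ := h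
        simp [h1, h2, h3, h4, h5, h6]
    simp only [List.count_cons, List.countP_cons]
    omega

-- ===== VERDICT (by name: the statement is the Claim_ definition above) =====
theorem lyricist_count_spec : Claim_equal_lyricist_count := by
  intro lyricist _
  unfold Spec_lyricist_count lyricist_count lyricist_count_alt
  by_cases hg : lyricist = "no_lyricist" ∨ lyricist = "no_composer" ∨ lyricist = "no_artist"
  · simp [hg, List.contains_eq_mem]
  · rw [if_neg hg, if_neg (by simpa [List.contains_eq_mem] using hg)]
    simp only [List.foldl]
    rw [PySem.List.foldl_if_add_one]
    simp only [PySem.Str.count_eq,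
      show ("|" : String).toList = ['|'] from rfl, show ("/" : String).toList = ['/'] from rfl,
      show ("\\" : String).toList = ['\\'] from rfl, show (";" : String).toList = [';'] from rfl,
      show ("," : String).toList = [','] from rfl, show ("&" : String).toList = ['&'] from rfl,
      pv_count_single]
    have h := pv_sum_counts lyricist.toList
    have hset : (PySem.Set.ofList ['|', '/', '\\', ';', ',', '&'] : List Char)
        = ['|', '/', '\\', ';', ',', '&'] := by decide
    simp only [hset,
      show PySem.Set.contains (['|', '/', '\\', ';', ',', '&'] : List Char)
          = (fun ch => (['|', '/', '\\', ';', ',', '&'] : List Char).contains ch) from rfl]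
    omega
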